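-- pv_equiv track=rewrite | github.com/tkgaolol/brushcode_juejin | code/100.py | solution
-- ===== SOURCE A (Python) =====
-- def solution(A):
--     n = len(A)
--     liars = 0
--
--     for i in range(n):
--         # 统计小于等于当前分数的学生数量
--         less_or_equal = sum(1 for x in A if x <= A[i])
--         # 统计大于当前分数的学生数量
--         greater = n - less_or_equal
--         # 如果小于等于的数量大于大于的数量，则该学生说谎
--         if less_or_equal > greater:
--             liars += 1
--
--     return liars
-- ===== SOURCE B (Python) =====
-- def solution(A):
--     # An element is a "liar" iff (# of x <= it) > n/2, i.e. iff it is >= the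
--     # upper-median value sorted(A)[n//2]; count those in one pass.
--     if not A:
--         return 0
--     t = sorted(A)[len(A) // 2]
--     return sum(1 for x in A if x >= t)
-- ===== Notes on version B (the rewrite author's own statement) =====
-- stated objective: faster
-- what changed: Instead of re-scanning the whole list for every element (quadratic), B sorts once, reads the upper-median value sorted(A)[n//2], and counts in one pass the elements >= that value (an element is a liar iff its <=-count exceeds n/2, i.e. iff it is >= the upper median).
import Mathlib
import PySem

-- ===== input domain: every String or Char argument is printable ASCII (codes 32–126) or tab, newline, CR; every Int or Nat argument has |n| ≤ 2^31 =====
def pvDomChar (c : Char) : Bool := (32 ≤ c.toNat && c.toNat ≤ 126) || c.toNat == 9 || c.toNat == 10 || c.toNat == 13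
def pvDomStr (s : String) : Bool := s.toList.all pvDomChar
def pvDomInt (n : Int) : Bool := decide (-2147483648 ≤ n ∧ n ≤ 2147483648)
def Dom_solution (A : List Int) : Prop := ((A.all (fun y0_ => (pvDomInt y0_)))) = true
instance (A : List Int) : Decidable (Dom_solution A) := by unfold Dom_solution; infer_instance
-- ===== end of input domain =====

-- B replaces A's quadratic per-element counting by one sort: an element is a liar
-- iff it is ≥ the upper-median value sorted(A)[n//2]; objective: faster (asymptotic).

-- ===== PORT A =====
def solution (A : List Int) : Int :=
  let n := A.length
  (PySem.List.pyRange 0 (n : Int) 1).foldl (fun liars i =>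
    let less_or_equal : Int :=
      A.foldl (fun acc x => if x ≤ PySem.List.pyGetD A i 0 then acc + 1 else acc) 0
    let greater : Int := (n : Int) - less_or_equal
    if less_or_equal > greater then liars + 1 else liars) 0

-- ===== PORT B =====
def solution_alt (A : List Int) : Int :=
  if A = [] then 0
  else
    let t := PySem.List.pyGetD (PySem.List.sorted A (fun x => x) false)
              (PySem.Int.floordiv (A.length : Int) 2) 0
    A.foldl (fun acc x => if x ≥ t then acc + 1 else acc) 0

-- ===== PRECONDITION & SPEC =====
def Spec_solution (A : List Int) (out : Int) : Prop := out = solution_alt A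
instance (A : List Int) (out : Int) : Decidable (Spec_solution A out) := by unfold Spec_solution; infer_instance

-- ===== CLAIM (what is proved, stated in full; the proofs are below) =====
def Claim_equal_solution : Prop := ∀ (A : List Int), Dom_solution A → Spec_solution A (solution A)

-- ===== LEMMAS AND PROOFS =====

-- On a ≤-sorted list, the count of elements ≤ v exceeds m iff the element at index m is ≤ v.
lemma countP_le_sorted_prefix (s : List Int) (v : Int) (m : Nat)
    (hs : s.Pairwise (· ≤ ·)) (hm : m < s.length) :
    (m < s.countP (fun x => decide (x ≤ v))) ↔ s.getD m 0 ≤ v := by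
  induction s generalizing m with
  | nil => simp at hm
  | cons a tl ih =>
    rcases List.pairwise_cons.mp hs with ⟨ha, ptl⟩
    by_cases hav : a ≤ v
    · cases m with
      | zero => simp [hav]
      | succ m =>
        have hm' : m < tl.length := by simpa using hm
        simp only [List.countP_cons, hav, decide_true, if_pos, List.getD_cons_succ]
        rw [← ih m ptl hm']
        omega
    · have htl : tl.countP (fun x => decide (x ≤ v)) = 0 := by
        rw [List.countP_eq_zero]
        intro x hx
        simp only [decide_eq_true_eq]
        exact fun hxle => hav (le_trans (ha x hx) hxle)
      cases m with
      | zero => simp [hav, htl]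
      | succ m =>
        have hm' : m < tl.length := by simpa using hm
        have hgel : tl.getD m 0 = tl[m] := List.getD_eq_getElem tl 0 hm'
        have hge : a ≤ tl.getD m 0 := hgel ▸ ha _ (List.getElem_mem hm')
        have hc : (a :: tl).countP (fun x => decide (x ≤ v)) = 0 := by
          simp [htl, hav]
        rw [hc, List.getD_cons_succ]
        constructor
        · intro h; exact absurd h (by omega)
        · intro hle; exact absurd (le_trans hge hle) hav

-- ===== VERDICT (by name: the statement is the Claim_ definition above) =====
theorem solution_spec : Claim_equal_solution := by
  intro A _
  unfold Spec_solution solution solution_alt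
  by_cases hA : A = []
  · subst hA; simp [PySem.List.pyRange_one_eq_nil]
  · simp only [if_neg hA]
    have hn : 0 < A.length := List.length_pos_iff.mpr hA
    set s := PySem.List.sorted A (fun x => x) false with hsdef
    have hperm : s.Perm A := PySem.List.sorted_perm A (fun x => x) false
    have hslen : s.length = A.length := hperm.length_eq
    have hm : A.length / 2 < s.length := by
      rw [hslen]; exact Nat.div_lt_self hn (by norm_num)
    have hfd : PySem.Int.floordiv (A.length : Int) 2 = ((A.length / 2 : Nat) : Int) := by
      exact_mod_cast PySem.Int.floordiv_natCast A.length 2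
    rw [hfd, PySem.List.pyGetD_natCast]
    set t := s.getD (A.length / 2) 0 with htdef
    rw [PySem.List.foldl_pyRange_zero_pyGetD' A 0
      (fun liars w =>
        let less_or_equal : Int :=
          A.foldl (fun acc x => if x ≤ w then acc + 1 else acc) 0
        let greater : Int := (A.length : Int) - less_or_equal
        if less_or_equal > greater then liars + 1 else liars) 0]
    apply PySem.List.foldl_congr_mem
    intro acc x hx
    simp only
    have hcnt : A.foldl (fun acc x_1 => if x_1 ≤ x then acc + 1 else acc) 0
        = (A.countP (fun y => decide (y ≤ x)) : Int) := by
      rw [PySem.List.foldl_ite_add_one]; ring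
    have hcs : s.countP (fun y => decide (y ≤ x)) = A.countP (fun y => decide (y ≤ x)) :=
      hperm.countP_eq _
    have hkey : (A.length / 2 < s.countP (fun y => decide (y ≤ x))) ↔ t ≤ x :=
      countP_le_sorted_prefix s x (A.length / 2)
        (by simpa using PySem.List.sorted_pairwise A (fun x => x)) hm
    have hiff : ((A.countP (fun y => decide (y ≤ x)) : Int)
        > (A.length : Int) - (A.countP (fun y => decide (y ≤ x)) : Int)) ↔ t ≤ x := by
      rw [← hcs, ← hkey]; omega
    rw [hcnt]
    by_cases hc : t ≤ x
    · rw [if_pos (hiff.mpr hc), if_pos hc]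
    · rw [if_neg (fun h => hc (hiff.mp h)), if_neg hc]
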